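-- pv_equiv track=rewrite | github.com/BenFoley2021/citation_prediction_from_google_scholar | data_cleaning_and_analysis/one_hot_encode.py | compositionOfDicBow
-- ===== SOURCE A (Python) =====
-- def compositionOfDicBow(dicBow,authorSet,journalSet):
--     """ figuring out which source is contributing how many factors to dicBow
--         right now we just the tokens form the title, the authors, and journals
--
--
--     Parameters
--     ----------
--     dicBow : TYPE
--         DESCRIPTION.
--     authorSet : TYPE
--         DESCRIPTION.
--     journalSet : TYPE
--         DESCRIPTION.
--
--     Returns
--     -------
--     None.
--
--     """
--
--     outDict = {}
--     authorCount = 0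
--     journalCount = 0
--     otherCount = 0
--
--     for key in dicBow:
--         if key in authorSet:
--             authorCount += 1
--         elif key in journalSet:
--             journalCount += 1
--         else:
--             otherCount += 1
--
--     outDict['author'] = authorCount
--     outDict['journal'] = journalCount
--     outDict['other'] = otherCount
--
--     return outDict
-- ===== SOURCE B (Python) =====
-- def compositionOfDicBow(dicBow, authorSet, journalSet):
--     # Categorise each key once per category: count authors, then journals
--     # not already counted as authors; 'other' is the complement of the total.
--     total = len(dicBow)
--     author = sum(1 for k in dicBow if k in authorSet)
--     journal = sum(1 for k in dicBow if k in journalSet and k not in authorSet)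
--     return {'author': author, 'journal': journal, 'other': total - author - journal}
-- ===== Notes on version B (the rewrite author's own statement) =====
-- stated objective: alternative
-- what changed: Replaces the single if/elif/else counting loop with independent per-category passes (author count, journal-minus-author count) and computes 'other' arithmetically as the complement of the total.
import Mathlib
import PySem

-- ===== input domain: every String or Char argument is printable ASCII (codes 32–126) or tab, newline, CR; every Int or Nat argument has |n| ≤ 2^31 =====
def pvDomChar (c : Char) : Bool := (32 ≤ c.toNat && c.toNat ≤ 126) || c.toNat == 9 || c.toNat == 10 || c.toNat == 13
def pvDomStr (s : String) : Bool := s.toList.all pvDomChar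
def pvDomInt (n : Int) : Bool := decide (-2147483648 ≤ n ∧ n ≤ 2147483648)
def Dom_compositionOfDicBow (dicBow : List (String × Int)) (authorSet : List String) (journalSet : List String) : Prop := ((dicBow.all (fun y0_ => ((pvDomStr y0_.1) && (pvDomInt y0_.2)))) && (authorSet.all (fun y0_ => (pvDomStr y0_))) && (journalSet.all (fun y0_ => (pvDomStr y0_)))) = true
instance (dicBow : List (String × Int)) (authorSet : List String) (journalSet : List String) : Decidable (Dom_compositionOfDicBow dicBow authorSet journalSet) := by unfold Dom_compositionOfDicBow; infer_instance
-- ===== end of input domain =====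

-- ===== PORT A =====
-- B categorises by independent passes and a complement; A's single if/elif/else loop. RETURN-value equivalence.
def compositionOfDicBow (dicBow : List (String × Int)) (authorSet : List String) (journalSet : List String) : List (String × Int) :=
  let counts : Int × Int × Int :=
    dicBow.foldl (fun (acc : Int × Int × Int) kv =>
      if kv.1 ∈ authorSet then (acc.1 + 1, acc.2.1, acc.2.2)
      else if kv.1 ∈ journalSet then (acc.1, acc.2.1 + 1, acc.2.2)
      else (acc.1, acc.2.1, acc.2.2 + 1)) (0, 0, 0)
  let outDict : PySem.Dict String Int :=
    ((PySem.Dict.empty.insert "author" counts.1).insert "journal" counts.2.1).insert "other" counts.2.2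
  outDict.items

-- ===== PORT B =====
def compositionOfDicBow_alt (dicBow : List (String × Int)) (authorSet : List String) (journalSet : List String) : List (String × Int) :=
  let total : Int := dicBow.length
  let author : Int := dicBow.countP (fun p => authorSet.contains p.1)
  let journal : Int := dicBow.countP (fun p => journalSet.contains p.1 && !authorSet.contains p.1)
  [("author", author), ("journal", journal), ("other", total - author - journal)]

-- ===== PRECONDITION & SPEC =====
def Spec_compositionOfDicBow (dicBow : List (String × Int)) (authorSet : List String) (journalSet : List String) (out : List (String × Int)) : Prop := out = compositionOfDicBow_alt dicBow authorSet journalSet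
instance (dicBow : List (String × Int)) (authorSet : List String) (journalSet : List String) (out : List (String × Int)) : Decidable (Spec_compositionOfDicBow dicBow authorSet journalSet out) := by unfold Spec_compositionOfDicBow; infer_instance

-- ===== CLAIM =====
def Claim_equal_compositionOfDicBow : Prop := ∀ (dicBow : List (String × Int)) (authorSet : List String) (journalSet : List String), Dom_compositionOfDicBow dicBow authorSet journalSet → Spec_compositionOfDicBow dicBow authorSet journalSet (compositionOfDicBow dicBow authorSet journalSet)

-- ===== LEMMAS AND PROOFS =====
theorem cod_loop (dicBow : List (String × Int)) (authorSet journalSet : List String)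
    (a j o : Int) :
    dicBow.foldl (fun (acc : Int × Int × Int) kv =>
      if kv.1 ∈ authorSet then (acc.1 + 1, acc.2.1, acc.2.2)
      else if kv.1 ∈ journalSet then (acc.1, acc.2.1 + 1, acc.2.2)
      else (acc.1, acc.2.1, acc.2.2 + 1)) (a, j, o)
    = (a + dicBow.countP (fun p => authorSet.contains p.1),
       j + dicBow.countP (fun p => journalSet.contains p.1 && !authorSet.contains p.1),
       o + ((dicBow.length : Int)
            - dicBow.countP (fun p => authorSet.contains p.1)
            - dicBow.countP (fun p => journalSet.contains p.1 && !authorSet.contains p.1))) := by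
  induction dicBow generalizing a j o with
  | nil => simp
  | cons hd tl ih =>
    simp only [List.foldl_cons, List.countP_cons, List.length_cons]
    by_cases hA : hd.1 ∈ authorSet
    · simp only [if_pos hA, ih]
      simp [hA]
      omega
    · by_cases hJ : hd.1 ∈ journalSet
      · simp only [if_neg hA, if_pos hJ, ih]
        simp [hA, hJ]
        omega
      · simp only [if_neg hA, if_neg hJ, ih]
        simp [hA, hJ]
        omega

-- ===== VERDICT =====
theorem compositionOfDicBow_spec : Claim_equal_compositionOfDicBow := by
  intro dicBow authorSet journalSet _
  unfold Spec_compositionOfDicBow compositionOfDicBow compositionOfDicBow_alt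
  simp only [cod_loop]
  simp [PySem.Dict.insert, PySem.Dict.empty]
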